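-- pv_equiv track=rewrite | github.com/naoentendotu/compiladores | analisador.py | analisador
-- ===== SOURCE A (Python) =====
-- tabela = {
--     ("S", "int"): ["D", "S"],
--     ("S", "float"): ["D", "S"],
--     ("S", "char"): ["D", "S"],
--     ("S", "$"): ["ε"],
--
--     ("D", "int"): ["T", "L", ";"],
--     ("D", "float"): ["T", "L", ";"],
--     ("D", "char"): ["T", "L", ";"],
--
--     ("T", "int"): ["int"],
--     ("T", "float"): ["float"],
--     ("T", "char"): ["char"],
--
--     ("L", "id"): ["id", "L′"],
--
--     ("L′", ","): [",", "id", "L′"],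
--     ("L′", ";"): ["ε"]
-- }
--
-- def analisador(tokens):
--     tokens = tokens + ["$"]
--     pilha = ["$", "S"]
--
--     while pilha:
--         topo = pilha.pop()
--         lookahead = tokens[0]
--
--         if topo == "ε":
--             continue
--
--         if topo in ["int", "float", "char", "id", ",", ";", "$"]:
--             if topo == lookahead:
--                 tokens.pop(0)
--             else:
--                 return False
--         else:
--             chave = (topo, lookahead)
--             if chave in tabela:
--                 producao = tabela[chave]
--                 for simbolo in reversed(producao):
--                     pilha.append(simbolo)
--             else:
--                 return False
--
--     return len(tokens) == 0 or tokens == ["$"]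
-- ===== SOURCE B (Python) =====
-- # Recursive-descent rewrite of the table-driven LL(1) stack machine.
-- def parse_Lp(ts):
--     # L' -> ", id L'" | epsilon ; stops on anything that is not ","
--     while ts and ts[0] == ",":
--         if len(ts) < 2 or ts[1] != "id":
--             return None
--         ts = ts[2:]
--     return ts
--
-- def parse_D(ts):
--     # D -> T L ";"  with T -> int|float|char and L -> id L'
--     if not ts or ts[0] not in ("int", "float", "char"):
--         return None
--     if len(ts) < 2 or ts[1] != "id":
--         return None
--     ts = parse_Lp(ts[2:])
--     if ts is None:
--         return None
--     if not ts or ts[0] != ";":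
--         return None
--     return ts[1:]
--
-- def parse_S(ts):
--     # S -> D S | epsilon (epsilon only in front of "$")
--     while ts and ts[0] in ("int", "float", "char"):
--         ts = parse_D(ts)
--         if ts is None:
--             return None
--     if ts and ts[0] == "$":
--         return ts
--     return None
--
-- def analisador(tokens):
--     ts = parse_S(tokens + ["$"])
--     if ts is None:
--         return False
--     rest = ts[1:]  # consume the "$" parse_S stopped at
--     return rest == [] or rest == ["$"]
-- ===== Notes on version B (the rewrite author's own statement) =====
-- stated objective: alternative
-- what changed: Replaced the table-driven LL(1) stack machine (explicit parse stack + production table) by a recursive-descent parser with one helper per nonterminal that branches on the lookahead and consumes the token list directly.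
import Mathlib
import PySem

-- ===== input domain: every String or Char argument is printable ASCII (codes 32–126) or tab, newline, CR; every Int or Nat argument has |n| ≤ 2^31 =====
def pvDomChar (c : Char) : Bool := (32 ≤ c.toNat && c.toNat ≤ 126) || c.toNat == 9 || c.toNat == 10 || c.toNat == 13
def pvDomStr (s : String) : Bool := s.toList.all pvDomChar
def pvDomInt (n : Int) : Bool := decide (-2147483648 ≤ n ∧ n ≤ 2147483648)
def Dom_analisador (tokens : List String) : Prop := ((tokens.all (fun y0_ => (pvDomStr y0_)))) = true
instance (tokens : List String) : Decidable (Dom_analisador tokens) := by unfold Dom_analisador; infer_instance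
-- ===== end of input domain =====

-- B replaces the table-driven LL(1) stack machine by a recursive-descent parser
-- over the same grammar (objective: alternative decomposition, similar cost).

-- ===== PORT A =====
-- the production table `tabela`, as a lookup on (topo, lookahead)
def tabela? (topo la : String) : Option (List String) :=
  if topo = "S" then
    if la = "int" ∨ la = "float" ∨ la = "char" then some ["D", "S"]
    else if la = "$" then some ["ε"] else none
  else if topo = "D" then
    if la = "int" ∨ la = "float" ∨ la = "char" then some ["T", "L", ";"] else none
  else if topo = "T" then
    if la = "int" then some ["int"]
    else if la = "float" then some ["float"]
    else if la = "char" then some ["char"] else none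
  else if topo = "L" then
    if la = "id" then some ["id", "L′"] else none
  else if topo = "L′" then
    if la = "," then some [",", "id", "L′"]
    else if la = ";" then some ["ε"] else none
  else none

-- the `while pilha:` loop, with a fuel guard for totality (none = fuel ran out).
-- Stack head = Python's list end (the top); Python pushes reversed(producao), so
-- the pops come in production order: the new stack is `prod ++ rest`.
-- `ts = []` with a nonempty stack is where Python's `tokens[0]` would raise; it is
-- unreachable from analisador's initial configuration (the sentinel "$" is consumed
-- only by the stack-bottom "$", after which the stack is empty).
def loopA : Nat → List String → List String → Option Bool
  | 0, _, _ => none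
  | _ + 1, ts, [] => some (decide (ts.length = 0) || decide (ts = ["$"]))
  | f + 1, ts, topo :: rest =>
    match ts with
    | [] => none
    | la :: ts' =>
      if topo = "ε" then loopA f ts rest
      else if topo ∈ (["int", "float", "char", "id", ",", ";", "$"] : List String) then
        if topo = la then loopA f ts' rest else some false
      else
        match tabela? topo la with
        | some prod => loopA f ts (prod ++ rest)
        | none => some false

def analisador (tokens : List String) : Bool :=
  -- fuel 5*|tokens|+25 is proved sufficient below (the *_sim lemmas bound the step count)
  (loopA (5 * tokens.length + 25) (tokens ++ ["$"]) ["S", "$"]).getD false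

-- ===== PORT B =====
def parseLp : List String → Option (List String)
  | a :: b :: t => if a = "," then (if b = "id" then parseLp t else none) else some (a :: b :: t)
  | [a] => if a = "," then none else some [a]
  | [] => some []

def parseD (ts : List String) : Option (List String) :=
  match ts with
  | a :: b :: t =>
    if a = "int" ∨ a = "float" ∨ a = "char" then
      if b = "id" then
        match parseLp t with
        | some (c :: r) => if c = ";" then some r else none
        | some [] => none
        | none => none
      else none
    else none
  | _ => none

-- needed by parseS for termination
theorem parseLp_length : ∀ (ts r : List String), parseLp ts = some r → r.length ≤ ts.length
  | [], r, h => by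
      simp only [parseLp, Option.some.injEq] at h
      rw [← h]
  | [a], r, h => by
      simp only [parseLp] at h
      by_cases ha : a = ","
      · rw [if_pos ha] at h; exact absurd h (by simp)
      · rw [if_neg ha] at h
        injection h with h
        exact (congrArg List.length h).ge
  | a :: b :: t, r, h => by
      simp only [parseLp] at h
      by_cases ha : a = ","
      · rw [if_pos ha] at h
        by_cases hb : b = "id"
        · rw [if_pos hb] at h
          have := parseLp_length t r h
          simp only [List.length_cons]; omega
        · rw [if_neg hb] at h; exact absurd h (by simp)
      · rw [if_neg ha] at h
        injection h with h
        exact (congrArg List.length h).ge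

theorem parseD_length (ts r : List String) (h : parseD ts = some r) : r.length < ts.length := by
  match ts with
  | [] => simp [parseD] at h
  | [a] => simp [parseD] at h
  | a :: b :: t =>
    simp only [parseD] at h
    by_cases hA : a = "int" ∨ a = "float" ∨ a = "char"
    case neg => rw [if_neg hA] at h; exact absurd h (by simp)
    rw [if_pos hA] at h
    by_cases hb : b = "id"
    case neg => rw [if_neg hb] at h; exact absurd h (by simp)
    rw [if_pos hb] at h
    rcases hLp : parseLp t with _ | r'
    · rw [hLp] at h
      exact absurd (show (none : Option (List String)) = some r from h) (by simp)
    · rw [hLp] at h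
      rcases r' with _ | ⟨c, r2⟩
      · exact absurd (show (none : Option (List String)) = some r from h) (by simp)
      · have h' : (if c = ";" then some r2 else none) = some r := h
        by_cases hc : c = ";"
        case neg => rw [if_neg hc] at h'; exact absurd h' (by simp)
        rw [if_pos hc] at h'
        injection h' with hr
        subst hr
        have := parseLp_length t (c :: r2) hLp
        simp only [List.length_cons] at *
        omega

def parseS (ts : List String) : Option (List String) :=
  match ts with
  | a :: t =>
    if a = "int" ∨ a = "float" ∨ a = "char" then
      match h : parseD (a :: t) with
      | some r => parseS r
      | none => none
    else if a = "$" then some (a :: t) else none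
  | [] => none
termination_by ts.length
decreasing_by exact parseD_length _ _ h

def analisador_alt (tokens : List String) : Bool :=
  match parseS (tokens ++ ["$"]) with
  | none => false
  | some ts =>
    let rest := ts.drop 1  -- consume the "$" parseS stopped at
    rest == ([] : List String) || rest == ["$"]

-- ===== PRECONDITION & SPEC =====
def Spec_analisador (tokens : List String) (out : Bool) : Prop := out = analisador_alt tokens
instance (tokens : List String) (out : Bool) : Decidable (Spec_analisador tokens out) := by unfold Spec_analisador; infer_instance

-- ===== CLAIM (what is proved, stated in full; the proofs are below) =====
def Claim_equal_analisador : Prop := ∀ (tokens : List String), Dom_analisador tokens → Spec_analisador tokens (analisador tokens)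

-- ===== LEMMAS AND PROOFS =====

-- one step of the machine, as a rewriting lemma
theorem loopA_step (f : Nat) (la : String) (ts' : List String) (topo : String) (rest : List String) :
    loopA (f + 1) (la :: ts') (topo :: rest) =
      if topo = "ε" then loopA f (la :: ts') rest
      else if topo ∈ (["int", "float", "char", "id", ",", ";", "$"] : List String) then
        if topo = la then loopA f ts' rest else some false
      else
        match tabela? topo la with
        | some prod => loopA f (la :: ts') (prod ++ rest)
        | none => some false := rfl

-- fuel monotonicity
theorem loopA_mono (f f' : Nat) (ts p : List String) (b : Bool)
    (h : loopA f ts p = some b) (hle : f ≤ f') : loopA f' ts p = some b := by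
  induction f generalizing f' ts p with
  | zero => simp [loopA] at h
  | succ f ih =>
    obtain ⟨f'', rfl⟩ : ∃ g, f' = g + 1 := ⟨f' - 1, by omega⟩
    have hle' : f ≤ f'' := by omega
    cases p with
    | nil => simp only [loopA] at h ⊢; exact h
    | cons topo rest =>
      cases ts with
      | nil => simp [loopA] at h
      | cons la ts' =>
        rw [loopA_step] at h ⊢
        split_ifs at h ⊢
        · exact ih _ _ _ h hle'
        · exact ih _ _ _ h hle'
        · exact h
        · rcases htab : tabela? topo la with _ | prod <;> rw [htab] at h
          · exact h
          · exact ih _ _ _ h hle'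

-- suffix invariant: the token list still ends with the sentinel
def EndsD (ts : List String) : Prop := ∃ p, ts = p ++ ["$"]

theorem endsD_nil : ¬ EndsD [] := by rintro ⟨p, hp⟩; simp at hp

theorem endsD_cons {a : String} {t : List String} (h : EndsD (a :: t)) (hne : t ≠ []) : EndsD t := by
  obtain ⟨p, hp⟩ := h
  cases p with
  | nil => simp at hp; exact absurd hp.2 hne
  | cons q p' => injection hp with h1 h2; exact ⟨p', h2⟩

theorem endsD_singleton {a : String} (h : EndsD [a]) : a = "$" := by
  obtain ⟨p, hp⟩ := h
  cases p with
  | nil => simpa using hp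
  | cons q p' =>
    have := congrArg List.length hp
    simp at this

-- the sub-list the machine still has to read never loses its trailing "$",
-- so `tokens[0]` exists whenever the lemmas below unfold a step
theorem endsD_tail {a b : String} {t : List String} (h : EndsD (a :: b :: t)) : EndsD (b :: t) :=
  endsD_cons h (by simp)

-- ---- simulation of the L′ phase ----
theorem lp_sim_some : ∀ (ts r rest : List String), EndsD ts → parseLp ts = some r →
    r.head? = some ";" →
    ∃ k, k ≤ 2 * (ts.length - r.length) + 2 ∧ EndsD r ∧ r.length ≤ ts.length ∧
      ∀ f, loopA (f + k) ts ("L′" :: rest) = loopA f r rest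
  | [], r, rest, hE, h, hh => absurd hE endsD_nil
  | [a], r, rest, hE, h, hh => by
      simp only [parseLp] at h
      by_cases ha : a = ","
      · rw [if_pos ha] at h; exact absurd h (by simp)
      · rw [if_neg ha] at h
        injection h with h
        subst h
        simp only [List.head?_cons, Option.some.injEq] at hh
        subst hh
        refine ⟨2, by simp, hE, le_refl _, fun f => ?_⟩
        have e : f + 2 = f + 1 + 1 := rfl
        rw [e]
        simp [loopA_step, tabela?, loopA]
  | a :: b :: t, r, rest, hE, h, hh => by
      simp only [parseLp] at h
      by_cases ha : a = ","
      · rw [if_pos ha] at h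
        by_cases hb : b = "id"
        · rw [if_pos hb] at h
          subst ha; subst hb
          have hE1 : EndsD ("id" :: t) := endsD_tail hE
          have ht : t ≠ [] := by
            rintro rfl
            exact absurd (endsD_singleton hE1) (by decide)
          have hEt : EndsD t := endsD_cons hE1 ht
          obtain ⟨k, hk, hEr, hlen, htr⟩ := lp_sim_some t r rest hEt h hh
          refine ⟨k + 3, by simp only [List.length_cons]; omega, hEr,
            by simp only [List.length_cons]; omega, fun f => ?_⟩
          have e : f + (k + 3) = (f + k) + 1 + 1 + 1 := by omega
          rw [e]
          simp only [loopA_step, tabela?]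
          norm_num
          exact htr f
        · rw [if_neg hb] at h; exact absurd h (by simp)
      · -- a ≠ ",": parseLp stops here, r = a :: b :: t, with a = ";"
        rw [if_neg ha] at h
        injection h with h
        subst h
        simp only [List.head?_cons, Option.some.injEq] at hh
        subst hh
        refine ⟨2, by simp, hE, le_refl _, fun f => ?_⟩
        have e : f + 2 = f + 1 + 1 := rfl
        rw [e]
        simp [loopA_step, tabela?]
termination_by ts => ts.length

theorem lp_sim_none : ∀ (ts rest : List String), EndsD ts →
    (parseLp ts = none ∨ ∃ r, parseLp ts = some r ∧ r.head? ≠ some ";") →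
    ∃ k, k ≤ 2 * ts.length + 4 ∧ loopA k ts ("L′" :: rest) = some false
  | [], rest, hE, _ => absurd hE endsD_nil
  | [a], rest, hE, hc => by
      have ha : a = "$" := endsD_singleton hE
      subst ha
      exact ⟨1, by simp, by simp [tabela?, loopA]⟩
  | a :: b :: t, rest, hE, hc => by
      by_cases ha : a = ","
      · subst ha
        by_cases hb : b = "id"
        · subst hb
          have hE1 : EndsD ("id" :: t) := endsD_tail hE
          have ht : t ≠ [] := by
            rintro rfl
            have := endsD_singleton hE1
            exact absurd this (by decide)
          have hEt : EndsD t := endsD_cons hE1 ht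
          have hc' : parseLp t = none ∨ ∃ r, parseLp t = some r ∧ r.head? ≠ some ";" := by
            rcases hc with hn | ⟨r, hr, hh⟩
            · left; simpa [parseLp] using hn
            · right; exact ⟨r, by simpa [parseLp] using hr, hh⟩
          obtain ⟨k, hk, hrun⟩ := lp_sim_none t rest hEt hc'
          refine ⟨k + 3, by simp only [List.length_cons]; omega, ?_⟩
          have e : k + 3 = k + 1 + 1 + 1 := rfl
          rw [e]
          simp only [loopA_step, tabela?]
          norm_num
          exact hrun
        · -- "," then something that is not id: the machine consumes "," and fails on the id terminal
          refine ⟨3, by simp only [List.length_cons]; omega, ?_⟩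
          have e : (3 : Nat) = 0 + 1 + 1 + 1 := rfl
          rw [e]
          simp [loopA_step, tabela?, Ne.symm hb]
      · by_cases ha2 : a = ";"
        · -- parseLp returns the list headed by ";": the "≠ some ';'" side is impossible
          exfalso
          subst ha2
          rcases hc with hn | ⟨r, hr, hh⟩
          · simp [parseLp] at hn
          · simp only [parseLp, if_neg (by decide : ¬(";" : String) = ","), Option.some.injEq] at hr
            subst hr; simp at hh
        · -- lookahead with no L′ entry: immediate reject
          refine ⟨1, by simp only [List.length_cons]; omega, ?_⟩
          have e : (1 : Nat) = 0 + 1 := rfl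
          rw [e]
          simp [loopA_step, tabela?, ha, ha2]

-- ---- simulation of the D phase ----
theorem d_sim_some (ts r rest : List String) (hE : EndsD ts) (h : parseD ts = some r) :
    ∃ k, k + 5 ≤ 5 * (ts.length - r.length) ∧ EndsD r ∧ r.length < ts.length ∧
      ∀ f, loopA (f + k) ts ("D" :: rest) = loopA f r rest := by
  match ts with
  | [] => simp [parseD] at h
  | [a] => simp [parseD] at h
  | a :: b :: t =>
    simp only [parseD] at h
    by_cases hA : a = "int" ∨ a = "float" ∨ a = "char"
    case neg => rw [if_neg hA] at h; exact absurd h (by simp)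
    rw [if_pos hA] at h
    by_cases hb : b = "id"
    case neg => rw [if_neg hb] at h; exact absurd h (by simp)
    rw [if_pos hb] at h
    subst hb
    rcases hLp : parseLp t with _ | r'
    · rw [hLp] at h
      exact absurd (show (none : Option (List String)) = some r from h) (by simp)
    · rw [hLp] at h
      rcases r' with _ | ⟨c, r2⟩
      · exact absurd (show (none : Option (List String)) = some r from h) (by simp)
      · have h' : (if c = ";" then some r2 else none) = some r := h
        by_cases hc : c = ";"
        case neg => rw [if_neg hc] at h'; exact absurd h' (by simp)
        rw [if_pos hc] at h'
        injection h' with hr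
        subst hr
        subst hc
        have hE1 : EndsD ("id" :: t) := endsD_tail hE
        have ht : t ≠ [] := by
          rintro rfl
          exact absurd (endsD_singleton hE1) (by decide)
        have hEt : EndsD t := endsD_cons hE1 ht
        obtain ⟨kl, hkl, hEsr, hlenl, htrl⟩ :=
          lp_sim_some t (";" :: r2) (";" :: rest) hEt hLp (by simp)
        have hEr : EndsD r2 := by
          have hne : r2 ≠ [] := by
            rintro rfl
            exact absurd (endsD_singleton hEsr) (by decide)
          exact endsD_cons hEsr hne
        have hlen2 : r2.length + 1 ≤ t.length := by simpa using hlenl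
        refine ⟨kl + 6, by simp only [List.length_cons] at *; omega, hEr,
          by simp only [List.length_cons]; omega, fun f => ?_⟩
        have e : f + (kl + 6) = ((f + 1) + kl) + 1 + 1 + 1 + 1 + 1 := by omega
        rw [e]
        rcases hA with rfl | rfl | rfl <;>
          · simp [loopA_step, tabela?]
            rw [htrl (f + 1)]
            simp [loopA_step]

theorem d_sim_none (ts rest : List String) (hE : EndsD ts) (h : parseD ts = none) :
    ∃ k, k ≤ 5 * ts.length + 10 ∧ loopA k ts ("D" :: rest) = some false := by
  match ts with
  | [] => exact absurd hE endsD_nil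
  | [a] =>
    have ha : a = "$" := endsD_singleton hE
    subst ha
    exact ⟨1, by simp, by simp [tabela?, loopA]⟩
  | a :: b :: t =>
    by_cases hA : a = "int" ∨ a = "float" ∨ a = "char"
    · by_cases hb : b = "id"
      · -- type and id consumed; the list part must have failed
        simp only [parseD] at h
        rw [if_pos hA, if_pos hb] at h
        subst hb
        have hE1 : EndsD ("id" :: t) := endsD_tail hE
        have ht : t ≠ [] := by
          rintro rfl
          exact absurd (endsD_singleton hE1) (by decide)
        have hEt : EndsD t := endsD_cons hE1 ht
        have hc : parseLp t = none ∨ ∃ r, parseLp t = some r ∧ r.head? ≠ some ";" := by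
          rcases hLp : parseLp t with _ | r'
          · exact Or.inl rfl
          · refine Or.inr ⟨r', rfl, ?_⟩
            rw [hLp] at h
            rcases r' with _ | ⟨c, r2⟩
            · simp
            · have h' : (if c = ";" then some r2 else none) = (none : Option (List String)) := h
              by_cases hcc : c = ";"
              · rw [if_pos hcc] at h'; exact absurd h' (by simp)
              · simpa using hcc
        obtain ⟨k, hk, hrun⟩ := lp_sim_none t (";" :: rest) hEt hc
        refine ⟨k + 5, by simp only [List.length_cons] at *; omega, ?_⟩
        have e : k + 5 = k + 1 + 1 + 1 + 1 + 1 := rfl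
        rw [e]
        rcases hA with rfl | rfl | rfl <;>
          · simp [loopA_step, tabela?]
            simpa [loopA_step, tabela?] using hrun
      · -- type consumed, then no ("L", b) entry
        refine ⟨4, by simp only [List.length_cons]; omega, ?_⟩
        have e : (4 : Nat) = 0 + 1 + 1 + 1 + 1 := rfl
        rw [e]
        rcases hA with rfl | rfl | rfl <;> simp [loopA_step, tabela?, hb]
    · -- no ("D", a) entry
      refine ⟨1, by simp only [List.length_cons]; omega, ?_⟩
      have hA1 : a ≠ "int" := fun h' => hA (Or.inl h')
      have hA2 : a ≠ "float" := fun h' => hA (Or.inr (Or.inl h'))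
      have hA3 : a ≠ "char" := fun h' => hA (Or.inr (Or.inr h'))
      have e : (1 : Nat) = 0 + 1 := rfl
      rw [e]
      simp [loopA_step, tabela?, hA1, hA2, hA3]

-- ---- simulation of the S phase ----
theorem s_sim_some : ∀ (ts r rest : List String), EndsD ts → parseS ts = some r →
    ∃ k, k ≤ 5 * (ts.length - r.length) + 2 ∧ r.head? = some "$" ∧ r.length ≤ ts.length ∧
      ∀ f, loopA (f + k) ts ("S" :: rest) = loopA f r rest
  | [], r, rest, hE, h => absurd hE endsD_nil
  | a :: t, r, rest, hE, h => by
      rw [parseS.eq_def] at h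
      simp only [] at h
      by_cases hA : a = "int" ∨ a = "float" ∨ a = "char"
      · rw [if_pos hA] at h
        split at h
        case _ r' hD =>
          obtain ⟨kd, hkd, hEr', hlt, htrd⟩ := d_sim_some (a :: t) r' ("S" :: rest) hE hD
          obtain ⟨ks, hks, hhead, hlen, htrs⟩ := s_sim_some r' r rest hEr' h
          refine ⟨kd + ks + 1, by simp only [List.length_cons] at *; omega, hhead,
            by simp only [List.length_cons] at *; omega, fun f => ?_⟩
          have e : f + (kd + ks + 1) = (((f + ks) + kd)) + 1 := by omega
          rw [e]
          rcases hA with rfl | rfl | rfl <;>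
            · simp [loopA_step, tabela?]
              rw [htrd (f + ks), htrs f]
        case _ => simp at h
      · rw [if_neg hA] at h
        by_cases hd : a = "$"
        · subst hd
          rw [if_pos rfl] at h
          simp only [Option.some.injEq] at h; subst h
          refine ⟨2, by simp, by simp, le_refl _, fun f => ?_⟩
          have e : f + 2 = f + 1 + 1 := rfl
          rw [e]
          simp [loopA_step, tabela?]
        · rw [if_neg hd] at h; simp at h
termination_by ts _ _ => ts.length
decreasing_by simpa using hlt

theorem s_sim_none : ∀ (ts rest : List String), EndsD ts → parseS ts = none →
    ∃ k, k ≤ 5 * ts.length + 15 ∧ loopA k ts ("S" :: rest) = some false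
  | [], rest, hE, h => absurd hE endsD_nil
  | a :: t, rest, hE, h => by
      rw [parseS.eq_def] at h
      simp only [] at h
      by_cases hA : a = "int" ∨ a = "float" ∨ a = "char"
      · rw [if_pos hA] at h
        split at h
        case _ r' hD =>
          obtain ⟨kd, hkd, hEr', hlt, htrd⟩ := d_sim_some (a :: t) r' ("S" :: rest) hE hD
          obtain ⟨ks, hks, hrun⟩ := s_sim_none r' rest hEr' h
          refine ⟨kd + ks + 1, by simp only [List.length_cons] at *; omega, ?_⟩
          have e : kd + ks + 1 = ((ks + kd)) + 1 := by omega
          rw [e]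
          rcases hA with rfl | rfl | rfl <;>
            · simp [loopA_step, tabela?]
              rw [htrd ks]
              exact hrun
        case _ hD =>
          obtain ⟨kd, hkd, hrun⟩ := d_sim_none (a :: t) ("S" :: rest) hE hD
          refine ⟨kd + 1, by simp only [List.length_cons] at *; omega, ?_⟩
          rcases hA with rfl | rfl | rfl <;>
            · simp [loopA_step, tabela?]
              simpa [loopA_step, tabela?] using hrun
      · rw [if_neg hA] at h
        by_cases hd : a = "$"
        · subst hd; rw [if_pos rfl] at h; simp at h
        · have hA1 : a ≠ "int" := fun h' => hA (Or.inl h')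
          have hA2 : a ≠ "float" := fun h' => hA (Or.inr (Or.inl h'))
          have hA3 : a ≠ "char" := fun h' => hA (Or.inr (Or.inr h'))
          refine ⟨1, by simp only [List.length_cons]; omega, ?_⟩
          have e : (1 : Nat) = 0 + 1 := rfl
          rw [e]
          simp [loopA_step, tabela?, hA1, hA2, hA3, hd]
termination_by ts _ => ts.length
decreasing_by simpa using hlt

-- ---- the two ports agree ----
theorem analisador_eq (tokens : List String) : analisador tokens = analisador_alt tokens := by
  unfold analisador analisador_alt
  have hE : EndsD (tokens ++ ["$"]) := ⟨tokens, rfl⟩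
  have hlen0 : (tokens ++ ["$"]).length = tokens.length + 1 := by simp
  rcases hS : parseS (tokens ++ ["$"]) with _ | r
  · obtain ⟨k, hk, hrun⟩ := s_sim_none (tokens ++ ["$"]) ["$"] hE hS
    have hrun' : loopA (5 * tokens.length + 25) (tokens ++ ["$"]) ["S", "$"] = some false :=
      loopA_mono k _ _ _ false hrun (by omega)
    simp [hrun']
  · obtain ⟨k, hk, hhead, hlen, htr⟩ := s_sim_some (tokens ++ ["$"]) r ["$"] hE hS
    obtain ⟨q, rfl⟩ : ∃ q, r = "$" :: q := by
      cases r with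
      | nil => simp at hhead
      | cons x q =>
        simp only [List.head?_cons, Option.some.injEq] at hhead
        exact ⟨q, by rw [hhead]⟩
    have hkb : k ≤ 5 * tokens.length + 7 := by omega
    have eF : 5 * tokens.length + 25 = ((5 * tokens.length + 23 - k) + 1 + 1) + k := by omega
    rw [eF, htr]
    have e2 : ∀ m : Nat, loopA (m + 1 + 1) ("$" :: q) ["$"]
        = some (decide (q.length = 0) || decide (q = ["$"])) := by
      intro m; simp [loopA]
    rw [e2]
    simp only [Option.getD_some, List.drop_succ_cons, List.drop_zero]
    by_cases h1 : q = [] <;> by_cases h2 : q = ["$"] <;> simp [h1, h2]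

-- ===== VERDICT (by name: the statement is the Claim_ definition above) =====
theorem analisador_spec : Claim_equal_analisador := by
  intro tokens _
  unfold Spec_analisador
  exact analisador_eq tokens
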